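-- pv_equiv track=rewrite | github.com/noy-michaely/final-project | src/data_analysis.py | assign_brain_region
-- ===== SOURCE A (Python) =====
-- region_mapping = [
--     ("CP", "Sensory-Motor Cortex"),
--     ("P", "Parietal Lobe"),
--     ("PO", "Parietal-Occipital Lobe"),
--     ("C", "Central Sulcus"),
--     ("T", "Temporal Lobe"),
--     ("TP", "Temporal-Parietal Lobe"),
--     ("F", "Frontal Lobe"),
--     ("O", "Occipital Lobe"),
--     ("FC", "Motor Cortex"),
--     ("FT", "Frontal-Temporal Lobe"),
-- ]
--
-- def assign_brain_region(sensor_name):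
--     """
--     Assigns a brain region based on the sensor name using predefined mappings.
--     This version handles conflicts between short and long prefixes like 'P' and 'PO'.
--
--     Args:
--         sensor_name (str): The name of the EEG sensor.
--
--     Returns:
--         str: The corresponding brain region or 'Unknown Region' if not found.
--     """
--
--     # Special case for 'F' and 'AF' mapping to 'Frontal Lobe'
--     if sensor_name.startswith('F') or sensor_name.startswith('AF'):
--         return "Frontal Lobe"
--
--     # Prioritize longer prefixes (e.g., 'PO', 'TP') first to avoid conflicts with shorter prefixes
--     if sensor_name.startswith('PO'):
--         return "Parietal-Occipital Lobe"
--     if sensor_name.startswith('TP'):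
--         return "Temporal-Parietal Lobe"
--     if sensor_name.startswith('FT'):
--         return "Frontal-Temporal Lobe"
--     if sensor_name.startswith('CP'):
--         return "Sensory-Motor Cortex"
--     if sensor_name.startswith('FC'):
--         return "Motor Cortex"
--
--     # Regular mapping based on the first two characters
--     return next(
--         (region for prefix, region in region_mapping if sensor_name.startswith(prefix)),
--         "Unknown Region",  # Default value if not found
--     )
-- ===== SOURCE B (Python) =====
-- _second_rules = {
--     "F": lambda s2: "Frontal Lobe",
--     "A": lambda s2: "Frontal Lobe" if s2 == "F" else "Unknown Region",
--     "P": lambda s2: "Parietal-Occipital Lobe" if s2 == "O" else "Parietal Lobe",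
--     "T": lambda s2: "Temporal-Parietal Lobe" if s2 == "P" else "Temporal Lobe",
--     "C": lambda s2: "Sensory-Motor Cortex" if s2 == "P" else "Central Sulcus",
--     "O": lambda s2: "Occipital Lobe",
-- }
--
-- def assign_brain_region(sensor_name):
--     rule = _second_rules.get(sensor_name[:1])
--     if rule is None:
--         return "Unknown Region"
--     return rule(sensor_name[1:2])
-- ===== Notes on version B (the rewrite author's own statement) =====
-- stated objective: simpler
-- what changed: Replaces the chain of startswith guards plus a first-match scan over a priority-ordered prefix list with a single dict dispatch on the first character (via slicing, so short strings never index out of range), each entry deciding on the second character.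
import Mathlib
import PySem

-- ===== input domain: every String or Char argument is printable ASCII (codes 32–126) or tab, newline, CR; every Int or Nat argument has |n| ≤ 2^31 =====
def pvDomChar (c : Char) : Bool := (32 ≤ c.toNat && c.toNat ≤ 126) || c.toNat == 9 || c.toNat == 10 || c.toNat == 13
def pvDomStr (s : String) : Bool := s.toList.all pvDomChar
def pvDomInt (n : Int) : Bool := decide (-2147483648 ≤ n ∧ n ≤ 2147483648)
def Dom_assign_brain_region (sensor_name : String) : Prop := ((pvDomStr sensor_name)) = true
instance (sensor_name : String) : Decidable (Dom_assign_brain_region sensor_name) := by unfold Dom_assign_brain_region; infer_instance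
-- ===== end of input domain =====

-- B replaces A's startswith-guard chain and priority-ordered prefix scan with a
-- dict dispatch on the first character (taken by slicing), each entry looking at
-- the second character; objective: simpler.

-- ===== PORT A =====
def pvRegionMapping : List (String × String) := [
  ("CP", "Sensory-Motor Cortex"),
  ("P", "Parietal Lobe"),
  ("PO", "Parietal-Occipital Lobe"),
  ("C", "Central Sulcus"),
  ("T", "Temporal Lobe"),
  ("TP", "Temporal-Parietal Lobe"),
  ("F", "Frontal Lobe"),
  ("O", "Occipital Lobe"),
  ("FC", "Motor Cortex"),
  ("FT", "Frontal-Temporal Lobe")]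

-- next((region for prefix, region in region_mapping if sensor_name.startswith(prefix)), "Unknown Region")
def pvNextRegion (rules : List (String × String)) (s : String) : String :=
  match rules with
  | [] => "Unknown Region"
  | (p, r) :: rest => if PySem.Str.startswith s p then r else pvNextRegion rest s

def assign_brain_region (sensor_name : String) : String :=
  if PySem.Str.startswith sensor_name "F" || PySem.Str.startswith sensor_name "AF" then
    "Frontal Lobe"
  else if PySem.Str.startswith sensor_name "PO" then "Parietal-Occipital Lobe"
  else if PySem.Str.startswith sensor_name "TP" then "Temporal-Parietal Lobe"
  else if PySem.Str.startswith sensor_name "FT" then "Frontal-Temporal Lobe"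
  else if PySem.Str.startswith sensor_name "CP" then "Sensory-Motor Cortex"
  else if PySem.Str.startswith sensor_name "FC" then "Motor Cortex"
  else pvNextRegion pvRegionMapping sensor_name

-- ===== PORT B =====
-- the dict literal _second_rules: key = first character, value = rule on the second character
def pvSecondRules : List (String × (String → String)) := [
  ("F", fun _ => "Frontal Lobe"),
  ("A", fun s2 => if s2 = "F" then "Frontal Lobe" else "Unknown Region"),
  ("P", fun s2 => if s2 = "O" then "Parietal-Occipital Lobe" else "Parietal Lobe"),
  ("T", fun s2 => if s2 = "P" then "Temporal-Parietal Lobe" else "Temporal Lobe"),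
  ("C", fun s2 => if s2 = "P" then "Sensory-Motor Cortex" else "Central Sulcus"),
  ("O", fun _ => "Occipital Lobe")]

def assign_brain_region_alt (sensor_name : String) : String :=
  -- rule = _second_rules.get(sensor_name[:1]); sensor_name[1:2] via slicing
  match pvSecondRules.lookup (PySem.Str.slice sensor_name (some 0) (some 1)) with
  | none => "Unknown Region"
  | some rule => rule (PySem.Str.slice sensor_name (some 1) (some 2))

-- ===== PRECONDITION & SPEC =====
def Spec_assign_brain_region (sensor_name : String) (out : String) : Prop := out = assign_brain_region_alt sensor_name
instance (sensor_name : String) (out : String) : Decidable (Spec_assign_brain_region sensor_name out) := by unfold Spec_assign_brain_region; infer_instance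

-- ===== CLAIM (what is proved, stated in full; the proofs are below) =====
def Claim_equal_assign_brain_region : Prop := ∀ (sensor_name : String), Dom_assign_brain_region sensor_name → Spec_assign_brain_region sensor_name (assign_brain_region sensor_name)

-- ===== LEMMAS AND PROOFS =====


-- singleton-string comparison lemmas: slice results versus the literal keys
lemma pvBeqKey (c p : Char) : (String.ofList [c] == String.ofList [p]) = (c == p) := by
  simp [String.ofList_inj]

lemma pvKeyF (c : Char) : (String.ofList [c] == "F") = (c == 'F') := pvBeqKey c 'F'
lemma pvKeyA (c : Char) : (String.ofList [c] == "A") = (c == 'A') := pvBeqKey c 'A'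
lemma pvKeyP (c : Char) : (String.ofList [c] == "P") = (c == 'P') := pvBeqKey c 'P'
lemma pvKeyT (c : Char) : (String.ofList [c] == "T") = (c == 'T') := pvBeqKey c 'T'
lemma pvKeyC (c : Char) : (String.ofList [c] == "C") = (c == 'C') := pvBeqKey c 'C'
lemma pvKeyO (c : Char) : (String.ofList [c] == "O") = (c == 'O') := pvBeqKey c 'O'

lemma pvEqF (d : Char) : (String.ofList [d] = "F") ↔ (d = 'F') := by
  rw [show ("F" : String) = String.ofList ['F'] from rfl, String.ofList_inj]; simp
lemma pvEqO (d : Char) : (String.ofList [d] = "O") ↔ (d = 'O') := by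
  rw [show ("O" : String) = String.ofList ['O'] from rfl, String.ofList_inj]; simp
lemma pvEqP (d : Char) : (String.ofList [d] = "P") ↔ (d = 'P') := by
  rw [show ("P" : String) = String.ofList ['P'] from rfl, String.ofList_inj]; simp

-- the core case analysis on the first one or two characters
lemma pvKey (cs : List Char) :
    assign_brain_region (String.ofList cs) = assign_brain_region_alt (String.ofList cs) := by
  match cs with
  | [] => decide
  | [c] =>
    by_cases hF : c = 'F'; · subst hF; decide
    by_cases hA : c = 'A'; · subst hA; decide
    by_cases hP : c = 'P'; · subst hP; decide
    by_cases hT : c = 'T'; · subst hT; decide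
    by_cases hC : c = 'C'; · subst hC; decide
    by_cases hO : c = 'O'; · subst hO; decide
    simp [assign_brain_region, assign_brain_region_alt, pvNextRegion, pvRegionMapping,
      pvSecondRules, PySem.Str.startswith, PySem.Chars.startswith, List.isPrefixOf,
      PySem.Str.slice, PySem.List.slice, List.lookup, pvKeyF, pvKeyA, pvKeyP, pvKeyT,
      pvKeyC, pvKeyO, 
      Ne.symm hF, Ne.symm hP, Ne.symm hT, Ne.symm hC, Ne.symm hO,
      beq_false_of_ne hF, beq_false_of_ne hA, beq_false_of_ne hP, beq_false_of_ne hT,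
      beq_false_of_ne hC, beq_false_of_ne hO]
  | c :: d :: rest =>
    by_cases hF : c = 'F'
    · subst hF
      simp [assign_brain_region, assign_brain_region_alt, pvSecondRules,
        PySem.Str.startswith, PySem.Chars.startswith, List.isPrefixOf,
        PySem.Str.slice, PySem.List.slice]
    by_cases hA : c = 'A'
    · subst hA
      by_cases hd : d = 'F'
      · subst hd
        simp [assign_brain_region, assign_brain_region_alt, 
        pvSecondRules, PySem.Str.startswith, PySem.Chars.startswith, List.isPrefixOf,
        PySem.Str.slice, PySem.List.slice, List.lookup]
      · simp [assign_brain_region, assign_brain_region_alt, pvNextRegion, pvRegionMapping,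
        pvSecondRules, PySem.Str.startswith, PySem.Chars.startswith, List.isPrefixOf,
        PySem.Str.slice, PySem.List.slice, List.lookup, pvEqF, hd, Ne.symm hd]
    by_cases hP : c = 'P'
    · subst hP
      by_cases hd : d = 'O'
      · subst hd
        simp [assign_brain_region, assign_brain_region_alt, 
        pvSecondRules, PySem.Str.startswith, PySem.Chars.startswith, List.isPrefixOf,
        PySem.Str.slice, PySem.List.slice, List.lookup]
      · simp [assign_brain_region, assign_brain_region_alt, pvNextRegion, pvRegionMapping,
        pvSecondRules, PySem.Str.startswith, PySem.Chars.startswith, List.isPrefixOf,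
        PySem.Str.slice, PySem.List.slice, List.lookup, pvEqO, hd, Ne.symm hd]
    by_cases hT : c = 'T'
    · subst hT
      by_cases hd : d = 'P'
      · subst hd
        simp [assign_brain_region, assign_brain_region_alt, 
        pvSecondRules, PySem.Str.startswith, PySem.Chars.startswith, List.isPrefixOf,
        PySem.Str.slice, PySem.List.slice, List.lookup, 
]
      · simp [assign_brain_region, assign_brain_region_alt, pvNextRegion, pvRegionMapping,
        pvSecondRules, PySem.Str.startswith, PySem.Chars.startswith, List.isPrefixOf,
        PySem.Str.slice, PySem.List.slice, List.lookup, 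
        pvEqP, hd, Ne.symm hd]
    by_cases hC : c = 'C'
    · subst hC
      by_cases hd : d = 'P'
      · subst hd
        simp [assign_brain_region, assign_brain_region_alt, 
        pvSecondRules, PySem.Str.startswith, PySem.Chars.startswith, List.isPrefixOf,
        PySem.Str.slice, PySem.List.slice, List.lookup, 
]
      · simp [assign_brain_region, assign_brain_region_alt, pvNextRegion, pvRegionMapping,
        pvSecondRules, PySem.Str.startswith, PySem.Chars.startswith, List.isPrefixOf,
        PySem.Str.slice, PySem.List.slice, List.lookup, 
        pvEqP, hd, Ne.symm hd]
    by_cases hO : c = 'O'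
    · subst hO
      simp [assign_brain_region, assign_brain_region_alt, pvNextRegion, pvRegionMapping,
        pvSecondRules, PySem.Str.startswith, PySem.Chars.startswith, List.isPrefixOf,
        PySem.Str.slice, PySem.List.slice, List.lookup, 
]
    simp [assign_brain_region, assign_brain_region_alt, pvNextRegion, pvRegionMapping,
      pvSecondRules, PySem.Str.startswith, PySem.Chars.startswith, List.isPrefixOf,
      PySem.Str.slice, PySem.List.slice, List.lookup, pvKeyF, pvKeyA, pvKeyP, pvKeyT,
      pvKeyC, pvKeyO, 
      Ne.symm hF, Ne.symm hA, Ne.symm hP, Ne.symm hT, Ne.symm hC, Ne.symm hO,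
      beq_false_of_ne hF, beq_false_of_ne hA, beq_false_of_ne hP, beq_false_of_ne hT,
      beq_false_of_ne hC, beq_false_of_ne hO]

-- ===== VERDICT (by name: the statement is the Claim_ definition above) =====
theorem assign_brain_region_spec : Claim_equal_assign_brain_region := by
  intro s _
  show assign_brain_region s = assign_brain_region_alt s
  simpa using pvKey s.toList
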